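-- pv_equiv track=rewrite | github.com/Feyerabend/bb | workbook/ch05/sec5.11.2/pl0/compiler.py | _not_in_parens
-- ===== SOURCE A (Python) =====
-- def _not_in_parens(expr: str, pos: int) -> bool:
--     """Check if position is not inside parentheses"""
--     depth = 0
--     for i in range(pos):
--         if expr[i] == '(':
--             depth += 1
--         elif expr[i] == ')':
--             depth -= 1
--     return depth == 0
-- ===== SOURCE B (Python) =====
-- def _not_in_parens(expr: str, pos: int) -> bool:
--     """Divide-and-conquer: the net paren depth of a string splits additively
--     at any cut point, so recurse on halves down to single characters."""
--     def net(s: str) -> int: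
--         if not s:
--             return 0
--         if len(s) == 1:
--             return 1 if s == '(' else -1 if s == ')' else 0
--         m = len(s) // 2
--         return net(s[:m]) + net(s[m:])
--     return net(expr[:max(pos, 0)]) == 0
-- ===== Notes on version B (the rewrite author's own statement) =====
-- stated objective: alternative
-- what changed: Replaced the left-to-right signed-depth accumulator loop with a divide-and-conquer recursion: the net depth of the prefix is computed by splitting the string in halves down to single characters and adding the halves' depths, which is correct because net depth is additive under concatenation.
import Mathlib
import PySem

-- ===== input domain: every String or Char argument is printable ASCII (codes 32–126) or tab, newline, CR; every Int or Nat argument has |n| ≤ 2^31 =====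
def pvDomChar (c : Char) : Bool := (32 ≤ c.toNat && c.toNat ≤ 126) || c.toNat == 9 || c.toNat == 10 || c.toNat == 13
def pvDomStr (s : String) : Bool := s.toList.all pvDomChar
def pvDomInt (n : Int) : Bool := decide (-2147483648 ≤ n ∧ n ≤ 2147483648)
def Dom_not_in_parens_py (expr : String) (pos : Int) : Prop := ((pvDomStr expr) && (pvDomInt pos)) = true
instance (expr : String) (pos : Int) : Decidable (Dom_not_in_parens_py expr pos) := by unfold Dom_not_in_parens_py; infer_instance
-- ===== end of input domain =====

-- B replaces A's left-to-right signed-depth accumulator by a divide-and-conquer recursion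
-- on halves of the prefix (objective: alternative decomposition; net depth is additive).

-- ===== PORT A =====
-- one loop step: depth (none = IndexError already occurred), index i; expr[i] via pyGet?
def notInParensStep (cs : List Char) (acc : Option Int) (i : Int) : Option Int :=
  match acc with
  | none => none
  | some depth =>
    match PySem.List.pyGet? cs i with
    | none => none
    | some c => some (if c = '(' then depth + 1 else if c = ')' then depth - 1 else depth)

-- final 'return depth == 0' (none = IndexError, excluded by Pre_)
def notInParensFinish : Option Int → Bool
  | some d => d == 0
  | none => false

def not_in_parens_py (expr : String) (pos : Int) : Bool :=
  notInParensFinish ((PySem.List.pyRange 0 pos 1).foldl (notInParensStep expr.toList) (some 0))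

-- ===== PORT B =====
-- net(s): divide-and-conquer on halves; s[:m]/s[m:] with 0 ≤ m ≤ len s are exactly take/drop.
-- The fuel argument (= length of the initial string) only makes the recursion structural;
-- it never alters the computed value (dcNet_eq below).
def dcNet : Nat → List Char → Int
  | 0, _ => 0
  | fuel + 1, s =>
    if s.isEmpty then 0
    else if s.length = 1 then (if s = ['('] then 1 else if s = [')'] then -1 else 0)
    else dcNet fuel (s.take (s.length / 2)) + dcNet fuel (s.drop (s.length / 2))

def not_in_parens_py_alt (expr : String) (pos : Int) : Bool :=
  dcNet (PySem.Str.slice expr none (some (max pos 0))).toList.length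
        (PySem.Str.slice expr none (some (max pos 0))).toList == 0

-- ===== PRECONDITION & SPEC =====
-- Pre_ excludes exactly pos > len(expr), where Python A raises IndexError.
def Pre_not_in_parens_py (expr : String) (pos : Int) : Prop := pos ≤ (expr.toList.length : Int)
instance (expr : String) (pos : Int) : Decidable (Pre_not_in_parens_py expr pos) := by
  unfold Pre_not_in_parens_py; infer_instance

def pvWitness_not_in_parens_py : String × Int := ("(a)(b", 4)

def Spec_not_in_parens_py (expr : String) (pos : Int) (out : Bool) : Prop := out = not_in_parens_py_alt expr pos
instance (expr : String) (pos : Int) (out : Bool) : Decidable (Spec_not_in_parens_py expr pos out) := by unfold Spec_not_in_parens_py; infer_instance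

-- ===== CLAIM (what is proved, stated in full; the proofs are below) =====
def Claim_equal_not_in_parens_py : Prop := ∀ (expr : String) (pos : Int), Dom_not_in_parens_py expr pos → Pre_not_in_parens_py expr pos → Spec_not_in_parens_py expr pos (not_in_parens_py expr pos)

-- ===== LEMMAS AND PROOFS =====

-- The divide-and-conquer net depth equals count '(' − count ')' whenever fuel suffices.
lemma dcNet_eq : ∀ (n : Nat) (s : List Char), s.length ≤ n →
    dcNet n s = (s.count '(' : Int) - (s.count ')' : Int) := by
  intro n
  induction n with
  | zero =>
    intro s h
    have hs : s = [] := List.eq_nil_of_length_eq_zero (Nat.le_zero.mp h)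
    subst hs; simp [dcNet]
  | succ m ih =>
    intro s h
    by_cases h1 : s.isEmpty
    · have hs : s = [] := List.isEmpty_iff.mp h1
      subst hs; simp [dcNet]
    · by_cases h2 : s.length = 1
      · obtain ⟨c, rfl⟩ := List.length_eq_one_iff.mp h2
        by_cases hc : c = '('
        · subst hc; norm_num [dcNet, List.count_cons]
        · by_cases hc2 : c = ')'
          · subst hc2; norm_num [dcNet, List.count_cons]; exact hc
          · norm_num [dcNet, List.count_cons, hc, hc2]
      · rw [show dcNet (m + 1) s = dcNet m (s.take (s.length / 2)) + dcNet m (s.drop (s.length / 2))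
            by rw [dcNet, if_neg h1, if_neg h2]]
        have hlen : s.length ≠ 0 := by simpa [List.isEmpty_iff_length_eq_zero] using h1
        rw [ih _ (by simp; omega), ih _ (by simp; omega)]
        have hsplit := List.take_append_drop (s.length / 2) s
        have hc1 : s.count '(' = (s.take (s.length / 2)).count '(' + (s.drop (s.length / 2)).count '(' := by
          conv_lhs => rw [← hsplit]
          rw [List.count_append]
        have hc2 : s.count ')' = (s.take (s.length / 2)).count ')' + (s.drop (s.length / 2)).count ')' := by
          conv_lhs => rw [← hsplit]
          rw [List.count_append]
        rw [hc1, hc2]; push_cast; ring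

-- A's loop computes count '(' − count ')' over the first n characters.
lemma loopA (cs : List Char) (n : Nat) (h : n ≤ cs.length) (d : Int) :
    (PySem.List.pyRange 0 (n : Int) 1).foldl (notInParensStep cs) (some d)
      = some (d + ((cs.take n).count '(' : Int) - ((cs.take n).count ')' : Int)) := by
  induction n generalizing d with
  | zero => simp [PySem.List.pyRange_one_eq_nil]
  | succ m ih =>
    have hm : m < cs.length := by omega
    have hsplit : PySem.List.pyRange 0 ((m : Int) + 1) 1
        = PySem.List.pyRange 0 (m : Int) 1 ++ [(m : Int)] := by
      exact PySem.List.pyRange_one_succ_right (by positivity)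
    rw [show ((m + 1 : Nat) : Int) = (m : Int) + 1 by push_cast; ring, hsplit,
      List.foldl_append, ih (by omega)]
    simp only [List.foldl_cons, List.foldl_nil, notInParensStep, PySem.List.pyGet?_natCast,
      List.getElem?_eq_getElem hm, List.take_succ, Option.toList, List.count_append,
      List.count_cons, List.count_nil, Option.some.injEq]
    by_cases h1 : cs[m] = '('
    · simp [h1]; omega
    · by_cases h2 : cs[m] = ')'
      · simp [h1, h2]; omega
      · simp [h1, h2]

-- ===== VERDICT (by name: the statement is the Claim_ definition above) =====
theorem not_in_parens_py_spec : Claim_equal_not_in_parens_py := by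
  intro expr pos _ hpre
  unfold Spec_not_in_parens_py not_in_parens_py not_in_parens_py_alt
  have hmax0 : (0 : Int) ≤ max pos 0 := le_max_right _ _
  rw [PySem.Str.toList_slice, PySem.Chars.slice_eq_listSlice,
    PySem.List.slice_to expr.toList hmax0, dcNet_eq _ _ le_rfl]
  by_cases h0 : pos ≤ 0
  · rw [PySem.List.pyRange_one_eq_nil h0, show max pos 0 = 0 by omega]
    simp [notInParensFinish]
  · push_neg at h0
    have hcast : pos = ((pos.toNat : Nat) : Int) := by omega
    have hn : pos.toNat ≤ expr.toList.length := by
      unfold Pre_not_in_parens_py at hpre; omega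
    rw [show max pos 0 = pos by omega, hcast, loopA expr.toList pos.toNat hn 0]
    simp only [notInParensFinish, Int.toNat_natCast]
    rw [Bool.eq_iff_iff]
    simp only [beq_iff_eq]
    omega
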